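-- pv_equiv track=rewrite | github.com/Daniel-Santhiago/3Con_Test | DanielSanthiagodeSouza_3Con.py | classify_number
-- ===== SOURCE A (Python) =====
-- def classify_number(digits):
--     meter = []
--     for (key, digit) in enumerate(digits):
--         if(key>=1):
--             if (digits[key -1] < digits[key]):
--                 meter.append('I')
--             elif (digits[key -1] > digits[key]):
--                 meter.append('D')
--             else:
--                 meter.append('E')
--
--     increase_count = meter.count('I')
--     decrease_count = meter.count('D')
--     if (increase_count >0) and (decrease_count == 0):
--         classification = 'Increasing Number'
--     elif (increase_count == 0) and (decrease_count > 0):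
--         classification = 'Decreasing Number'
--     elif (increase_count >0) and (decrease_count > 0):
--         classification = 'Bouncy Number'
--     else:
--         classification = 'Constant Number'
--     return classification
-- ===== SOURCE B (Python) =====
-- def classify_number(digits):
--     d = list(digits)
--     asc = sorted(d)
--     desc = sorted(d, reverse=True)
--     if asc == desc:
--         return 'Constant Number'
--     if d == asc:
--         return 'Increasing Number'
--     if d == desc:
--         return 'Decreasing Number'
--     return 'Bouncy Number'
-- ===== Notes on version B (the rewrite author's own statement) =====
-- stated objective: simpler
-- what changed: Replaces the token-list-building loop plus two count passes with sort-and-compare: the list is classified by comparing it with its sorted and reverse-sorted versions.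
import Mathlib
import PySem

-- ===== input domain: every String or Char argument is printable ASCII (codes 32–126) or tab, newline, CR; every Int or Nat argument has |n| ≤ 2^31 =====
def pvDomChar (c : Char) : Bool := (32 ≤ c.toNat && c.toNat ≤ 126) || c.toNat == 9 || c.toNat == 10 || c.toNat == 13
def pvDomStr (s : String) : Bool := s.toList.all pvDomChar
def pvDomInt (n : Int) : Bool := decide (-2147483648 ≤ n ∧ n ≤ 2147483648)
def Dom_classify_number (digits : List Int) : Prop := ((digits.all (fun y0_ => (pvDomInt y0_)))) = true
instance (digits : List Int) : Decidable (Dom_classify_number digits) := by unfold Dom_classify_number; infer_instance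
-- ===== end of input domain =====

-- B replaces A's token-building loop and two count passes with sort-and-compare (simpler, not faster).

-- ===== PORT A =====
def classify_number (digits : List Int) : String :=
  let meter : List Char := (PySem.List.enumerate digits 0).foldl
    (fun meter kd =>
      if kd.1 ≥ 1 then
        if PySem.List.pyGetD digits (kd.1 - 1) 0 < PySem.List.pyGetD digits kd.1 0 then meter ++ ['I']
        else if PySem.List.pyGetD digits (kd.1 - 1) 0 > PySem.List.pyGetD digits kd.1 0 then meter ++ ['D']
        else meter ++ ['E']
      else meter) []
  let increase_count : Int := PySem.List.count meter 'I'
  let decrease_count : Int := PySem.List.count meter 'D'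
  if increase_count > 0 ∧ decrease_count = 0 then "Increasing Number"
  else if increase_count = 0 ∧ decrease_count > 0 then "Decreasing Number"
  else if increase_count > 0 ∧ decrease_count > 0 then "Bouncy Number"
  else "Constant Number"

-- ===== PORT B =====
def classify_number_alt (digits : List Int) : String :=
  let d := digits
  let asc := PySem.List.sorted d (fun x => x) false
  let desc := PySem.List.sorted d (fun x => x) true
  if asc = desc then "Constant Number"
  else if d = asc then "Increasing Number"
  else if d = desc then "Decreasing Number"
  else "Bouncy Number"

-- ===== PRECONDITION & SPEC =====
def Spec_classify_number (digits : List Int) (out : String) : Prop := out = classify_number_alt digits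
instance (digits : List Int) (out : String) : Decidable (Spec_classify_number digits out) := by unfold Spec_classify_number; infer_instance

-- ===== CLAIM (what is proved, stated in full; the proofs are below) =====
def Claim_equal_classify_number : Prop := ∀ (digits : List Int), Dom_classify_number digits → Spec_classify_number digits (classify_number digits)

-- ===== LEMMAS AND PROOFS =====

/-- The comparison tokens A's loop builds, as a structural recursion on adjacent pairs. -/
def pvTok : Int → List Int → List Char
  | _, [] => []
  | p, x :: t => (if p < x then 'I' else if p > x then 'D' else 'E') :: pvTok x t

lemma pv_fold_tok (digits : List Int) :
    ∀ (suf : List Int) (i : Nat) (prev : Int) (acc : List Char),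
    1 ≤ i → digits.drop (i - 1) = prev :: suf →
    (PySem.List.enumerate suf (i : Int)).foldl
      (fun meter kd =>
        if kd.1 ≥ 1 then
          if PySem.List.pyGetD digits (kd.1 - 1) 0 < PySem.List.pyGetD digits kd.1 0 then meter ++ ['I']
          else if PySem.List.pyGetD digits (kd.1 - 1) 0 > PySem.List.pyGetD digits kd.1 0 then meter ++ ['D']
          else meter ++ ['E']
        else meter) acc
    = acc ++ pvTok prev suf := by
  intro suf
  induction suf with
  | nil => intro i prev acc _ _; simp [pvTok, PySem.List.enumerate]
  | cons x t ih =>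
    intro i prev acc hi hdrop
    have hprev : PySem.List.pyGetD digits ((i : Int) - 1) 0 = prev := by
      have h1 : ((i : Int) - 1) = ((i - 1 : Nat) : Int) := by omega
      rw [h1, PySem.List.pyGetD_natCast]
      have h : (digits.drop (i-1))[0]? = some prev := by rw [hdrop]; rfl
      rw [List.getElem?_drop] at h
      simp at h
      simp [List.getD, h]
    have hdropi : digits.drop i = x :: t := by
      have h := congrArg List.tail hdrop
      simp only [List.tail_drop] at h
      have h2 : i - 1 + 1 = i := by omega
      rw [h2] at h
      simpa using h
    have hcur : PySem.List.pyGetD digits (i : Int) 0 = x := by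
      rw [PySem.List.pyGetD_natCast]
      have h : (digits.drop i)[0]? = some x := by rw [hdropi]; rfl
      rw [List.getElem?_drop] at h
      simp at h
      simp [List.getD, h]
    have hge : (1 : Int) ≤ (i : Int) := by exact_mod_cast hi
    have hcast : (i : Int) + 1 = ((i + 1 : Nat) : Int) := by push_cast; ring
    have hdrop' : digits.drop (i + 1 - 1) = x :: t := by simpa using hdropi
    simp only [PySem.List.enumerate_cons, List.foldl_cons, hprev, hcur, ge_iff_le]
    rw [if_pos hge, hcast]
    by_cases hlt : prev < x
    · rw [if_pos hlt, ih (i+1) x (acc ++ ['I']) (by omega) hdrop']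
      simp [pvTok, hlt]
    · rw [if_neg hlt]
      by_cases hgt : prev > x
      · rw [if_pos hgt, ih (i+1) x (acc ++ ['D']) (by omega) hdrop']
        simp [pvTok, hlt, hgt]
      · rw [if_neg hgt, ih (i+1) x (acc ++ ['E']) (by omega) hdrop']
        simp [pvTok, hlt, hgt]

lemma pv_meter_eq (a : Int) (rest : List Int) :
    (PySem.List.enumerate (a :: rest) 0).foldl
      (fun meter kd =>
        if kd.1 ≥ 1 then
          if PySem.List.pyGetD (a :: rest) (kd.1 - 1) 0 < PySem.List.pyGetD (a :: rest) kd.1 0 then meter ++ ['I']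
          else if PySem.List.pyGetD (a :: rest) (kd.1 - 1) 0 > PySem.List.pyGetD (a :: rest) kd.1 0 then meter ++ ['D']
          else meter ++ ['E']
        else meter) []
    = pvTok a rest := by
  have h0 : ¬ ((0 : Int) ≥ 1) := by omega
  simp only [PySem.List.enumerate_cons, List.foldl_cons]
  rw [if_neg h0]
  have := pv_fold_tok (a :: rest) rest 1 a [] (by omega) (by simp)
  simpa using this

lemma pv_countD_zero (xs : List Int) : ∀ p : Int,
    ((pvTok p xs).count 'D' = 0 ↔ List.IsChain (fun x y : Int => x ≤ y) (p :: xs)) := by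
  induction xs with
  | nil => intro p; simp [pvTok]
  | cons x t ih =>
    intro p
    rw [List.isChain_cons_cons, ← ih x]
    rcases lt_trichotomy p x with h | rfl | h
    · simp [pvTok, h]
      omega
    · simp [pvTok]
    · have hnl : ¬ p < x := by omega
      simp [pvTok, h, hnl]

lemma pv_countI_zero (xs : List Int) : ∀ p : Int,
    ((pvTok p xs).count 'I' = 0 ↔ List.IsChain (fun x y : Int => y ≤ x) (p :: xs)) := by
  induction xs with
  | nil => intro p; simp [pvTok]
  | cons x t ih =>
    intro p
    rcases lt_trichotomy p x with h | rfl | h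
    · rw [List.isChain_cons_cons, ← ih x]
      simp [pvTok, h]
    · rw [List.isChain_cons_cons, ← ih p]
      simp [pvTok]
    · rw [List.isChain_cons_cons, ← ih x]
      have hnl : ¬ p < x := by omega
      simp [pvTok, h, hnl]
      omega

lemma pv_pairwise_eq_all (l : List Int) (h : l.Pairwise (fun x y : Int => x = y)) :
    ∀ x ∈ l, ∀ y ∈ l, x = y := by
  induction l with
  | nil => simp
  | cons a t ih =>
    rw [List.pairwise_cons] at h
    intro x hx y hy
    rcases List.mem_cons.1 hx with hx | hx <;> rcases List.mem_cons.1 hy with hy | hy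
    · rw [hx, hy]
    · rw [hx]; exact h.1 y hy
    · rw [hy]; exact (h.1 x hx).symm
    · exact ih h.2 x hx y hy

-- ===== VERDICT =====
theorem classify_number_spec : Claim_equal_classify_number := by
  intro digits _
  unfold Spec_classify_number classify_number classify_number_alt
  cases digits with
  | nil => rfl
  | cons a rest =>
    rw [pv_meter_eq a rest]
    set d := a :: rest with hd
    set asc := PySem.List.sorted d (fun x => x) false with hasc
    set desc := PySem.List.sorted d (fun x => x) true with hdesc
    have hI := pv_countI_zero rest a
    have hD := pv_countD_zero rest a
    have eAsc : d = asc ↔ (pvTok a rest).count 'D' = 0 := by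
      rw [hD, List.isChain_iff_pairwise, hd]
      constructor
      · intro h; rw [h, hasc]; exact PySem.List.sorted_pairwise d (fun x => x)
      · intro h; rw [hasc, PySem.List.sorted_eq_self_of_pairwise d (fun x => x) h]
    have eDesc : d = desc ↔ (pvTok a rest).count 'I' = 0 := by
      rw [hI, List.isChain_iff_pairwise, hd]
      constructor
      · intro h; rw [h, hdesc]; exact PySem.List.sorted_pairwise_rev d (fun x => x)
      · intro h; rw [hdesc, PySem.List.sorted_rev_eq_self_of_pairwise d (fun x => x) h]
    have eConst : asc = desc ↔ ((pvTok a rest).count 'I' = 0 ∧ (pvTok a rest).count 'D' = 0) := by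
      constructor
      · intro h
        have p1 : asc.Pairwise (fun x y : Int => x ≤ y) := PySem.List.sorted_pairwise d (fun x => x)
        have p2 : asc.Pairwise (fun x y : Int => y ≤ x) := by
          rw [h]; exact PySem.List.sorted_pairwise_rev d (fun x => x)
        have peq : asc.Pairwise (fun x y : Int => x = y) :=
          (p1.and p2).imp (fun hxy => le_antisymm hxy.1 hxy.2)
        have hall : ∀ x ∈ d, ∀ y ∈ d, x = y := by
          intro x hx y hy
          exact pv_pairwise_eq_all asc peq x
            ((PySem.List.sorted_perm d (fun x => x) false).mem_iff.2 hx) y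
            ((PySem.List.sorted_perm d (fun x => x) false).mem_iff.2 hy)
        have hle : d.Pairwise (fun x y : Int => x ≤ y) :=
          List.pairwise_of_forall_mem_list (fun x hx y hy => le_of_eq (hall x hx y hy))
        have hge2 : d.Pairwise (fun x y : Int => y ≤ x) :=
          List.pairwise_of_forall_mem_list (fun x hx y hy => le_of_eq (hall y hy x hx))
        exact ⟨hI.2 (List.isChain_iff_pairwise.2 hge2), hD.2 (List.isChain_iff_pairwise.2 hle)⟩
      · intro h
        rw [← eAsc.2 h.2, ← eDesc.2 h.1]
    simp only [PySem.List.count_eq]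
    by_cases hi0 : List.count 'I' (pvTok a rest) = 0 <;>
      by_cases hd0 : List.count 'D' (pvTok a rest) = 0
    · have zI : ((List.count 'I' (pvTok a rest) : Int)) = 0 := by exact_mod_cast hi0
      have zD : ((List.count 'D' (pvTok a rest) : Int)) = 0 := by exact_mod_cast hd0
      rw [if_pos (eConst.2 ⟨hi0, hd0⟩), if_neg (by omega), if_neg (by omega), if_neg (by omega)]
    · have zI : ((List.count 'I' (pvTok a rest) : Int)) = 0 := by exact_mod_cast hi0
      have pD : (0 : Int) < ((List.count 'D' (pvTok a rest) : Int)) := by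
        exact_mod_cast Nat.pos_of_ne_zero hd0
      rw [if_neg (fun h => hd0 (eConst.1 h).2), if_neg (fun h => hd0 (eAsc.1 h)),
          if_pos (eDesc.2 hi0), if_neg (by omega), if_pos (by omega)]
    · have pI : (0 : Int) < ((List.count 'I' (pvTok a rest) : Int)) := by
        exact_mod_cast Nat.pos_of_ne_zero hi0
      have zD : ((List.count 'D' (pvTok a rest) : Int)) = 0 := by exact_mod_cast hd0
      rw [if_neg (fun h => hi0 (eConst.1 h).1), if_pos (eAsc.2 hd0), if_pos (by omega)]
    · have pI : (0 : Int) < ((List.count 'I' (pvTok a rest) : Int)) := by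
        exact_mod_cast Nat.pos_of_ne_zero hi0
      have pD : (0 : Int) < ((List.count 'D' (pvTok a rest) : Int)) := by
        exact_mod_cast Nat.pos_of_ne_zero hd0
      rw [if_neg (fun h => hi0 (eConst.1 h).1), if_neg (fun h => hd0 (eAsc.1 h)),
          if_neg (fun h => hi0 (eDesc.1 h)),
          if_neg (by omega), if_neg (by omega), if_pos (by omega)]
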